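-- pv_equiv track=rewrite | github.com/igrybkov/dotfiles | ansible_plugins/lookup/aggregated_profile_var.py | _aggregate_bool
-- ===== SOURCE A (Python) =====
-- def _aggregate_bool(
--
--     var_name: str,
--     hosts: list[str],
--     hostvars: dict,
--     strategy: str,
--     default,
-- ) -> bool:
--     """Aggregate boolean values from hosts using any/all/none logic.
--
--     Args:
--         var_name: The variable name to aggregate
--         hosts: List of host names to check
--         hostvars: Dictionary of host variables
--         strategy: One of 'any', 'all', or 'none'
--         default: Default value if no hosts define the variable
--
--     Returns:
--         - any: True if ANY host has a truthy value
--         - all: True if ALL hosts with the variable defined have truthy values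
--         - none: True if NO hosts have a truthy value
--     """
--     values = []
--     for host in hosts:
--         host_vars = hostvars.get(host, {})
--         if var_name in host_vars:
--             values.append(bool(host_vars[var_name]))
--
--     if not values:
--         # No hosts define the variable, return default
--         return bool(default) if default is not None else False
--
--     if strategy == "any":
--         return any(values)
--     elif strategy == "all":
--         return all(values)
--     else:  # none
--         return not any(values)
-- ===== SOURCE B (Python) =====
-- def _aggregate_bool(
--     var_name: str,
--     hosts: list[str],
--     hostvars: dict,
--     strategy: str,
--     default,
-- ) -> bool:
--     """Single pass with short-circuit: no intermediate values list."""
--     seen_defined = False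
--     for host in hosts:
--         host_vars = hostvars.get(host, {})
--         if var_name in host_vars:
--             seen_defined = True
--             v = bool(host_vars[var_name])
--             if strategy == "any":
--                 if v:
--                     return True
--             elif strategy == "all":
--                 if not v:
--                     return False
--             else:  # none
--                 if v:
--                     return False
--     if not seen_defined:
--         return bool(default) if default is not None else False
--     # post-loop defaults: any -> False, all/none -> True
--     return strategy != "any"
-- ===== Notes on version B (the rewrite author's own statement) =====
-- stated objective: alternative
-- what changed: Replaced A's build-a-values-list-then-reduce (values list + any/all/not-any) with a single accumulator pass over hosts that keeps only a seen_defined flag and short-circuits (returns on the first decisive value), falling back to the strategy's post-loop default.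
import Mathlib
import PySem

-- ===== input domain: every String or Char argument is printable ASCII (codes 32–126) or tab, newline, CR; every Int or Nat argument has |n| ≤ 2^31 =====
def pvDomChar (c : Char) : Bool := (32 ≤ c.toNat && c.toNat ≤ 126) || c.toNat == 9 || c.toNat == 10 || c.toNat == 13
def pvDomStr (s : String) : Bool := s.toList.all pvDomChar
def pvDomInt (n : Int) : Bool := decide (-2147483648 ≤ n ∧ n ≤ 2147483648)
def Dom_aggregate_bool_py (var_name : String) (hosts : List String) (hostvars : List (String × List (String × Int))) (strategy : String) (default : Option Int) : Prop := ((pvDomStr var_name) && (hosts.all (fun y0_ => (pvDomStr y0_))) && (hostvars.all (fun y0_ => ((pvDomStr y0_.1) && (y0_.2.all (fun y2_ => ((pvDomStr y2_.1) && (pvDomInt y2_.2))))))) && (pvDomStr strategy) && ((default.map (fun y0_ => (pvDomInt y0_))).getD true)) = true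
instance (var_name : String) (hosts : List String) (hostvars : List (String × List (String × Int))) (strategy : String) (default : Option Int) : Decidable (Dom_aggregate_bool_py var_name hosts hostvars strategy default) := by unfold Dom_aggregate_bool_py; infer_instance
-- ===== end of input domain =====

-- B replaces A's build-values-list-then-any/all/not-any with one short-circuiting
-- accumulator pass keeping only a seen_defined flag (objective: alternative).

-- ===== PORT A =====
-- hostvars.get(host, {}) followed by 'var_name in host_vars' + 'host_vars[var_name]':
-- first-match association-list lookup via PySem.Dict
def aggregate_bool_py (var_name : String) (hosts : List String) (hostvars : List (String × List (String × Int))) (strategy : String) (default : Option Int) : Bool :=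
  let values : List Bool := hosts.foldl (fun acc host =>
    let host_vars := (PySem.Dict.mk hostvars).getD host []
    match (PySem.Dict.mk host_vars).get? var_name with
    | some v => acc ++ [v != 0]      -- bool(host_vars[var_name])
    | none => acc) []
  if values = [] then
    match default with
    | some d => d != 0               -- bool(default)
    | none => false
  else if strategy == "any" then values.any id
  else if strategy == "all" then values.all id
  else !(values.any id)

-- ===== PORT B =====
def pvAggLoopB (var_name : String) (hostvars : List (String × List (String × Int))) (strategy : String) (default : Option Int) : List String → Bool → Bool
  | [], seen_defined =>
      if !seen_defined then
        match default with
        | some d => d != 0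
        | none => false
      else strategy != "any"
  | host :: rest, seen_defined =>
      let host_vars := (PySem.Dict.mk hostvars).getD host []
      match (PySem.Dict.mk host_vars).get? var_name with
      | some x =>
          let v := x != 0
          if strategy == "any" then
            if v then true else pvAggLoopB var_name hostvars strategy default rest true
          else if strategy == "all" then
            if !v then false else pvAggLoopB var_name hostvars strategy default rest true
          else
            if v then false else pvAggLoopB var_name hostvars strategy default rest true
      | none => pvAggLoopB var_name hostvars strategy default rest seen_defined

def aggregate_bool_py_alt (var_name : String) (hosts : List String) (hostvars : List (String × List (String × Int))) (strategy : String) (default : Option Int) : Bool :=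
  pvAggLoopB var_name hostvars strategy default hosts false

-- ===== PRECONDITION & SPEC =====
def Spec_aggregate_bool_py (var_name : String) (hosts : List String) (hostvars : List (String × List (String × Int))) (strategy : String) (default : Option Int) (out : Bool) : Prop := out = aggregate_bool_py_alt var_name hosts hostvars strategy default
instance (var_name : String) (hosts : List String) (hostvars : List (String × List (String × Int))) (strategy : String) (default : Option Int) (out : Bool) : Decidable (Spec_aggregate_bool_py var_name hosts hostvars strategy default out) := by unfold Spec_aggregate_bool_py; infer_instance

-- ===== CLAIM (what is proved, stated in full; the proofs are below) =====
def Claim_equal_aggregate_bool_py : Prop := ∀ (var_name : String) (hosts : List String) (hostvars : List (String × List (String × Int))) (strategy : String) (default : Option Int), Dom_aggregate_bool_py var_name hosts hostvars strategy default → Spec_aggregate_bool_py var_name hosts hostvars strategy default (aggregate_bool_py var_name hosts hostvars strategy default)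

-- ===== LEMMAS AND PROOFS =====

-- the defined boolean values A collects, as a filterMap
def pvCollect (var_name : String) (hostvars : List (String × List (String × Int))) (hosts : List String) : List Bool :=
  hosts.filterMap (fun host =>
    ((PySem.Dict.mk ((PySem.Dict.mk hostvars).getD host [])).get? var_name).map (· != 0))

-- A's strategy reduction
def pvRed (strategy : String) (vs : List Bool) : Bool :=
  if strategy == "any" then vs.any id
  else if strategy == "all" then vs.all id
  else !(vs.any id)

lemma pvCollect_cons (var_name : String) (hostvars : List (String × List (String × Int))) (h : String) (rest : List String) :
    pvCollect var_name hostvars (h :: rest) =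
      (match (PySem.Dict.mk ((PySem.Dict.mk hostvars).getD h [])).get? var_name with
       | some v => (v != 0) :: pvCollect var_name hostvars rest
       | none => pvCollect var_name hostvars rest) := by
  simp only [pvCollect, List.filterMap_cons]
  cases (PySem.Dict.mk ((PySem.Dict.mk hostvars).getD h [])).get? var_name <;> simp

lemma pvFoldl_eq_append_collect (var_name : String) (hostvars : List (String × List (String × Int))) (hosts : List String) (acc : List Bool) :
    hosts.foldl (fun acc host =>
      match (PySem.Dict.mk ((PySem.Dict.mk hostvars).getD host [])).get? var_name with
      | some v => acc ++ [v != 0]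
      | none => acc) acc = acc ++ pvCollect var_name hostvars hosts := by
  induction hosts generalizing acc with
  | nil => simp [pvCollect]
  | cons h rest ih =>
      rw [List.foldl_cons, pvCollect_cons]
      cases (PySem.Dict.mk ((PySem.Dict.mk hostvars).getD h [])).get? var_name <;>
        simp [ih]

lemma pvRed_nil (strategy : String) : pvRed strategy [] = (strategy != "any") := by
  simp only [pvRed]
  by_cases h1 : strategy == "any"
  · simp [(by simpa using h1 : strategy = "any")]
  · by_cases h2 : strategy == "all" <;> simp_all [bne]

lemma pvAggLoopB_eq (var_name : String) (hostvars : List (String × List (String × Int))) (strategy : String) (default : Option Int) (hosts : List String) (seen : Bool) :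
    pvAggLoopB var_name hostvars strategy default hosts seen =
      if pvCollect var_name hostvars hosts = [] ∧ seen = false then
        (match default with | some d => d != 0 | none => false)
      else pvRed strategy (pvCollect var_name hostvars hosts) := by
  induction hosts generalizing seen with
  | nil =>
      cases seen <;> simp [pvAggLoopB, pvCollect, pvRed_nil]
  | cons h rest ih =>
      rw [pvAggLoopB, pvCollect_cons]
      cases hg : (PySem.Dict.mk ((PySem.Dict.mk hostvars).getD h [])).get? var_name with
      | none => simpa using ih seen
      | some x =>
          by_cases h1 : strategy = "any"
          · subst h1
            by_cases hx : x = 0 <;> simp [hx, ih true, pvRed]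
          · by_cases h2 : strategy = "all"
            · subst h2
              by_cases hx : x = 0 <;> simp [hx, ih true, pvRed]
            · by_cases hx : x = 0 <;> simp [h1, h2, hx, ih true, pvRed]

-- ===== VERDICT (by name: the statement is the Claim_ definition above) =====
theorem aggregate_bool_py_spec : Claim_equal_aggregate_bool_py := by
  intro var_name hosts hostvars strategy default _
  show aggregate_bool_py _ _ _ _ _ = _
  simp only [aggregate_bool_py, aggregate_bool_py_alt]
  rw [pvFoldl_eq_append_collect, pvAggLoopB_eq]
  simp only [List.nil_append]
  by_cases hc : pvCollect var_name hostvars hosts = []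
  · simp [hc]
  · simp [hc, pvRed]
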